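-- pv_equiv track=rewrite | github.com/endredaroczy/hackerrank-python | the-minion-game.py | count
-- ===== SOURCE A (Python) =====
-- def count(letter_list, input_string):
--     index_list = []
--     index = 0
--     for s in input_string:
--         if s in letter_list:
--             index_list.append(index)
--         index += 1
--     input_string_len = len(input_string)
--     points = sum([input_string_len-i for i in index_list])
--     return points
-- ===== SOURCE B (Python) =====
-- def count(letter_list, input_string):
--     # Telescoping reformulation: the total sum of (len - i) over matching
--     # positions i equals the sum, over every position, of how many matching
--     # positions have been seen up to and including it.  So keep a running
--     # match counter and add it at EVERY step; no length, no per-match term.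
--     letters = set(letter_list)
--     points = 0
--     seen = 0
--     for ch in input_string:
--         if ch in letters:
--             seen += 1
--         points += seen
--     return points
-- ===== Notes on version B (the rewrite author's own statement) =====
-- stated objective: faster
-- what changed: A collects the matching indices and then sums len-i over them, testing each char against letter_list by a linear scan; B uses the telescoping identity sum(len-i) = sum over all positions of the running prefix match count, adding a running match counter at every step with membership via a set built once, so the O(m) inner scan disappears.
import Mathlib
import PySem

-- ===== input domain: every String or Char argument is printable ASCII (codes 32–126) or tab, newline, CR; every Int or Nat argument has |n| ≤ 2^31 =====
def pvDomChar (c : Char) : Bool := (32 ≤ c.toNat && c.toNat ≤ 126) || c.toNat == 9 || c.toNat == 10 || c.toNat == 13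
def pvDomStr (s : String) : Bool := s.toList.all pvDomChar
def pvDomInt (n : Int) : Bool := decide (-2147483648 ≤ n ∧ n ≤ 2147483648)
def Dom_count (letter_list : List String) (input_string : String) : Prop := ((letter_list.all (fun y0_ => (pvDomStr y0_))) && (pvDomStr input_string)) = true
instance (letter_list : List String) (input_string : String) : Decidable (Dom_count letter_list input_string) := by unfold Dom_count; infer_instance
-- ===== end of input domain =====

-- B replaces A's index list + "sum of (len - i)" second pass by the telescoping identity
-- sum(len - i) = sum over every position of the running prefix match count, with set membership
-- (objective: alternative decomposition, O(1) extra space, no use of len).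

-- ===== PORT A =====
-- loop body of A: state = (index_list, index)
def countStepA (letter_list : List String) (st : List Int × Int) (c : Char) : List Int × Int :=
  (if letter_list.contains (String.ofList [c]) then st.1 ++ [st.2] else st.1, st.2 + 1)

def count (letter_list : List String) (input_string : String) : Int :=
  let st := input_string.toList.foldl (countStepA letter_list) ([], 0)
  let input_string_len : Int := PySem.Str.len input_string
  ((st.1.map (fun i => input_string_len - i)).sum)

-- ===== PORT B =====
-- loop body of B: state = (points, seen); 'seen' bumps on a match, 'points' adds 'seen' every step
def countStepB (letters : PySem.Set String) (st : Int × Int) (c : Char) : Int × Int :=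
  let seen := if PySem.Set.contains letters (String.ofList [c]) then st.2 + 1 else st.2
  (st.1 + seen, seen)

def count_alt (letter_list : List String) (input_string : String) : Int :=
  let letters := PySem.Set.ofList letter_list
  let st := input_string.toList.foldl (countStepB letters) (0, 0)
  st.1

-- ===== PRECONDITION & SPEC =====
def Spec_count (letter_list : List String) (input_string : String) (out : Int) : Prop := out = count_alt letter_list input_string
instance (letter_list : List String) (input_string : String) (out : Int) : Decidable (Spec_count letter_list input_string out) := by unfold Spec_count; infer_instance

-- ===== CLAIM (what is proved, stated in full; the proofs are below) =====
def Claim_equal_count : Prop := ∀ (letter_list : List String) (input_string : String), Dom_count letter_list input_string → Spec_count letter_list input_string (count letter_list input_string)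

-- ===== LEMMAS AND PROOFS =====

-- set membership agrees with A's list membership test
theorem setContains_eq (L : List String) (x : String) :
    PySem.Set.contains (PySem.Set.ofList L) x = L.contains x := by
  simp [PySem.Set.mem_ofList]

-- shifting the reference index by one adds the list length to the (i - ·)-sum
theorem sum_shift (acc : List Int) (i : Int) :
    (acc.map (fun j => i + 1 - j)).sum = (acc.map (fun j => i - j)).sum + acc.length := by
  induction acc with
  | nil => simp
  | cons a t ih => simp [ih]; ring

-- A's running index after the fold is the start index plus the number of chars processed
theorem foldA_snd (L : List String) (cs : List Char) :
    ∀ (acc : List Int) (i : Int), (cs.foldl (countStepA L) (acc, i)).2 = i + cs.length := by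
  induction cs with
  | nil => intro acc i; simp
  | cons c cs ih =>
    intro acc i
    simp only [List.foldl_cons, countStepA, ih, List.length_cons]
    push_cast; ring

-- bridge invariant: if B's 'points' equals the (i - ·)-sum over A's collected indices and
-- B's 'seen' counts them, then after the loop B's 'points' is the (final-index - ·)-sum
theorem count_bridge (L : List String) (cs : List Char) :
    ∀ (acc : List Int) (i pts seen : Int),
    pts = (acc.map (fun j => i - j)).sum →
    seen = acc.length →
    (cs.foldl (countStepB (PySem.Set.ofList L)) (pts, seen)).1
      = (((cs.foldl (countStepA L) (acc, i)).1.map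
          (fun j => (cs.foldl (countStepA L) (acc, i)).2 - j)).sum) := by
  induction cs with
  | nil => intro acc i pts seen h1 _; simpa using h1
  | cons c cs ih =>
    intro acc i pts seen h1 h2
    simp only [List.foldl_cons, countStepA, countStepB, setContains_eq]
    by_cases hc : L.contains (String.ofList [c])
    · simp only [hc, if_pos]
      exact ih (acc ++ [i]) (i + 1) (pts + (seen + 1)) (seen + 1)
        (by simp [sum_shift, h1, h2]; ring) (by simp [h2])
    · simp only [hc, Bool.false_eq_true, if_false]
      exact ih acc (i + 1) (pts + seen) seen (by simp [sum_shift, h1, h2]) h2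

-- ===== VERDICT (by name: the statement is the Claim_ definition above) =====
theorem count_spec : Claim_equal_count := by
  intro L s _
  unfold Spec_count count count_alt
  have hb := count_bridge L s.toList [] 0 0 0 (by simp) (by simp)
  have hn : (s.toList.foldl (countStepA L) ([], (0 : Int))).2 = PySem.Str.len s := by
    simp [foldA_snd, PySem.Str.len]
  rw [hn] at hb
  exact hb.symm
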